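-- pv_equiv track=rewrite | github.com/Abhi-1122/Long-Context-Eval-dataset | mine_tasks.py | count_cross_file_hops
-- ===== SOURCE A (Python) =====
-- def is_test_file(filename):
--     return any(x in filename for x in ["test_", "_test.", "/tests/", "/test/", "spec."])
--
-- def is_source_file(filename):
--     exts = (".py", ".ts", ".js", ".go", ".rs", ".java", ".cpp", ".c", ".rb")
--     return (filename.endswith(exts) and not is_test_file(filename)
--             and not any(x in filename for x in ["setup.py", "conf.py", "migrations/"]))
--
-- def count_cross_file_hops(file_list):
--     """Pairs of source files in the same package = likely imports between them."""
--     hops = 0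
--     src = [f for f in file_list if is_source_file(f)]
--     for i, f1 in enumerate(src):
--         for f2 in src[i+1:]:
--             p1 = f1.split('/')[:-1]
--             p2 = f2.split('/')[:-1]
--             if p1 and p2 and p1[0] == p2[0]:
--                 hops += 1
--     return hops
-- ===== SOURCE B (Python) =====
-- def is_test_file(filename):
--     return any(x in filename for x in ["test_", "_test.", "/tests/", "/test/", "spec."])
--
-- def is_source_file(filename):
--     exts = (".py", ".ts", ".js", ".go", ".rs", ".java", ".cpp", ".c", ".rb")
--     return (filename.endswith(exts) and not is_test_file(filename)
--             and not any(x in filename for x in ["setup.py", "conf.py", "migrations/"]))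
--
-- def count_cross_file_hops(file_list):
--     """Pairs of source files in the same package = likely imports between them."""
--     counts = {}
--     hops = 0
--     for f in file_list:
--         if not is_source_file(f):
--             continue
--         parts = f.split('/')
--         if len(parts) < 2:
--             continue
--         top = parts[0]
--         hops += counts.get(top, 0)
--         counts[top] = counts.get(top, 0) + 1
--     return hops
-- ===== Notes on version B (the rewrite author's own statement) =====
-- stated objective: alternative
-- what changed: Replaced the nested all-pairs scan over source files with a single pass that groups files by their first path component in a dict and adds, for each new file, the number of earlier source files sharing that component.
import Mathlib
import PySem

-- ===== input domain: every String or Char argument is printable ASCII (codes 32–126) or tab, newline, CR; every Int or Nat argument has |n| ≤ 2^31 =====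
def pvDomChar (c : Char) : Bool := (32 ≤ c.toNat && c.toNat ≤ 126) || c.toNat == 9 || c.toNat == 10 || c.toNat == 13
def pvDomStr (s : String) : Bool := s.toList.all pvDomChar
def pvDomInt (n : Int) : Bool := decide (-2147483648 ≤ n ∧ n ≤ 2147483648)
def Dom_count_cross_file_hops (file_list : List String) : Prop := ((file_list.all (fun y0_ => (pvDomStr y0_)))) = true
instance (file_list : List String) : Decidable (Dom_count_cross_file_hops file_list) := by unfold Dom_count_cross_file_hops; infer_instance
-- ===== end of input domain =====

-- B replaces A's nested all-pairs scan with a single pass that counts, per first path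
-- component, how many earlier source files share it (objective: alternative algorithm).


-- ===== PORT A =====
-- shared module helpers (both Pythons call them verbatim)
def pvIsTestFile (filename : String) : Bool :=
  ["test_", "_test.", "/tests/", "/test/", "spec."].any (fun x => PySem.Str.isIn x filename)

def pvIsSourceFile (filename : String) : Bool :=
  ([".py", ".ts", ".js", ".go", ".rs", ".java", ".cpp", ".c", ".rb"].any
      (fun e => PySem.Str.endswith filename e))
  && !pvIsTestFile filename
  && !(["setup.py", "conf.py", "migrations/"].any (fun x => PySem.Str.isIn x filename))

-- f.split('/'); the separator is the non-empty literal "/", so split? never returns none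
def pvSplit (f : String) : List String := (PySem.Str.split? f "/").getD []

-- inner loop: for f2 in src[i+1:]
def pvInner (f1 : String) (rest : List String) (hops : Int) : Int :=
  rest.foldl (fun h f2 =>
    let p1 := (pvSplit f1).dropLast
    let p2 := (pvSplit f2).dropLast
    if !p1.isEmpty && !p2.isEmpty && (p1.head? == p2.head?) then h + 1 else h) hops

-- outer loop: for i, f1 in enumerate(src) with the slice src[i+1:]
def pvOuter : List String → Int → Int
  | [], hops => hops
  | f1 :: rest, hops => pvOuter rest (pvInner f1 rest hops)

def count_cross_file_hops (file_list : List String) : Int :=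
  pvOuter (file_list.filter pvIsSourceFile) 0

-- ===== PORT B =====
-- body of B's loop once the is_source_file guard has passed (state = (counts, hops))
def pvCore (st : PySem.Dict String Int × Int) (f : String) : PySem.Dict String Int × Int :=
  let parts := pvSplit f
  if parts.length < 2 then st
  else
    let top := parts.headD ""
    (st.1.insert top (st.1.getD top 0 + 1), st.2 + st.1.getD top 0)

def pvBStep (st : PySem.Dict String Int × Int) (f : String) : PySem.Dict String Int × Int :=
  if !pvIsSourceFile f then st else pvCore st f

def count_cross_file_hops_alt (file_list : List String) : Int :=
  (file_list.foldl pvBStep (PySem.Dict.empty, 0)).2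

-- ===== PRECONDITION & SPEC =====
def Spec_count_cross_file_hops (file_list : List String) (out : Int) : Prop := out = count_cross_file_hops_alt file_list
instance (file_list : List String) (out : Int) : Decidable (Spec_count_cross_file_hops file_list out) := by unfold Spec_count_cross_file_hops; infer_instance

-- ===== CLAIM (what is proved, stated in full; the proofs are below) =====
def Claim_equal_count_cross_file_hops : Prop := ∀ (file_list : List String), Dom_count_cross_file_hops file_list → Spec_count_cross_file_hops file_list (count_cross_file_hops file_list)

-- ===== LEMMAS AND PROOFS =====
-- the "package key" of a file: first path component, if the dirname part is non-empty
def pvKey (f : String) : Option String := ((pvSplit f).dropLast).head?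

-- pending contribution of the counter d to the files still to be processed
def pvP (d : PySem.Dict String Int) (xs : List String) : Int :=
  (xs.map (fun f => match pvKey f with | some k => d.getD k 0 | none => 0)).sum

theorem pvMatch_eq (f1 f2 : String) :
    (!(pvSplit f1).dropLast.isEmpty && !(pvSplit f2).dropLast.isEmpty
      && ((pvSplit f1).dropLast.head? == (pvSplit f2).dropLast.head?))
    = ((pvKey f1).isSome && (pvKey f2 == pvKey f1)) := by
  unfold pvKey
  cases h1 : (pvSplit f1).dropLast <;> cases h2 : (pvSplit f2).dropLast <;>
    simp [eq_comm]

theorem pvInner_eq (f1 : String) (rest : List String) (hops : Int) :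
    pvInner f1 rest hops
      = hops + ((rest.countP (fun f2 => (pvKey f1).isSome && (pvKey f2 == pvKey f1))) : Int) := by
  unfold pvInner
  rw [show (fun (h : Int) (f2 : String) =>
        let p1 := (pvSplit f1).dropLast
        let p2 := (pvSplit f2).dropLast
        if !p1.isEmpty && !p2.isEmpty && (p1.head? == p2.head?) then h + 1 else h)
      = fun h f2 => if ((pvKey f1).isSome && (pvKey f2 == pvKey f1)) then h + 1 else h from by
    funext h f2; simp only []; rw [pvMatch_eq]]
  exact PySem.List.foldl_count_if _ _ _

theorem pvOuter_add (xs : List String) : ∀ hops : Int, pvOuter xs hops = hops + pvOuter xs 0 := by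
  induction xs with
  | nil => intro hops; simp [pvOuter]
  | cons f r ih =>
      intro hops
      simp only [pvOuter, pvInner_eq]
      rw [ih (hops + _), ih (0 + _)]
      omega

theorem pvP_empty (xs : List String) : pvP PySem.Dict.empty xs = 0 := by
  induction xs with
  | nil => simp [pvP]
  | cons y ys ih =>
      simp only [pvP, List.map_cons, List.sum_cons] at ih ⊢
      rw [ih]
      cases hk : pvKey y <;> simp [PySem.Dict.getD_empty]

theorem pvP_insert (d : PySem.Dict String Int) (k : String) (xs : List String) :
    pvP (d.insert k (d.getD k 0 + 1)) xs
      = pvP d xs + ((xs.countP (fun f2 => pvKey f2 == some k)) : Int) := by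
  induction xs with
  | nil => simp [pvP]
  | cons y ys ih =>
      simp only [pvP, List.map_cons, List.sum_cons, List.countP_cons] at ih ⊢
      rw [ih]
      cases hk : pvKey y with
      | none => simp
      | some k' =>
          by_cases hkk : k' = k
          · simp [hkk]
            ring
          · have h1 : (d.insert k (d.getD k 0 + 1)).getD k' 0 = d.getD k' 0 := by
              rw [PySem.Dict.getD_insert]; simp [hkk]
            simp [hkk, h1]
            try ring

theorem pvKey_of_short (f : String) (h : (pvSplit f).length < 2) : pvKey f = none := by
  unfold pvKey
  rcases hl : pvSplit f with _ | ⟨a, _ | ⟨b, t⟩⟩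
  · simp
  · simp
  · rw [hl] at h; simp only [List.length_cons] at h; omega

theorem pvKey_of_long (f : String) (h : ¬ (pvSplit f).length < 2) :
    pvKey f = some ((pvSplit f).headD "") := by
  unfold pvKey
  rcases hl : pvSplit f with _ | ⟨a, _ | ⟨b, t⟩⟩
  · rw [hl] at h; simp only [List.length_nil] at h; omega
  · rw [hl] at h; simp only [List.length_cons, List.length_nil] at h; omega
  · simp

theorem pvMain (xs : List String) : ∀ (d : PySem.Dict String Int) (hops : Int),
    (xs.foldl pvCore (d, hops)).2 = pvOuter xs hops + pvP d xs := by
  induction xs with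
  | nil => intro d hops; simp [pvOuter, pvP]
  | cons f r ih =>
      intro d hops
      by_cases hf : (pvSplit f).length < 2
      · have hk := pvKey_of_short f hf
        have h1 : pvInner f r hops = hops := by
          rw [pvInner_eq]; simp [hk]
        simp only [List.foldl_cons, pvCore, if_pos hf]
        rw [ih]
        simp only [pvOuter, h1, pvP, List.map_cons, List.sum_cons, hk]
        ring
      · have hk := pvKey_of_long f hf
        simp only [List.foldl_cons, pvCore, if_neg hf]
        rw [ih, pvP_insert, pvOuter_add r (hops + _)]
        simp only [pvOuter, pvInner_eq, hk, Option.isSome_some, Bool.true_and, pvP,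
          List.map_cons, List.sum_cons]
        rw [pvOuter_add r (hops + _)]
        ring

theorem pvB_filter (fl : List String) (init : PySem.Dict String Int × Int) :
    fl.foldl pvBStep init = (fl.filter pvIsSourceFile).foldl pvCore init := by
  rw [List.foldl_filter]
  congr 1
  funext st f
  by_cases h : pvIsSourceFile f = true <;> simp [pvBStep, h]

-- ===== VERDICT (by name: the statement is the Claim_ definition above) =====
theorem count_cross_file_hops_spec : Claim_equal_count_cross_file_hops := by
  intro fl _
  unfold Spec_count_cross_file_hops count_cross_file_hops count_cross_file_hops_alt
  rw [pvB_filter, pvMain, pvP_empty]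
  omega
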